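-- pv_equiv track=rewrite | github.com/Sangeeths11/DashyBuilder | DashyBuilder.Backend/components/widgets/base.py | parse_grid_positions
-- ===== SOURCE A (Python) =====
-- def parse_grid_positions(grid_position_str, cols):
--     positions = list(map(int, grid_position_str.split(',')))
--
--     row_positions = [(pos - 1) // cols + 1 for pos in positions]
--     col_positions = [(pos - 1) % cols + 1 for pos in positions]
--
--     min_row, max_row = min(row_positions), max(row_positions)
--     min_col, max_col = min(col_positions), max(col_positions)
--
--     row_span = max_row - min_row + 1
--     col_span = max_col - min_col + 1
--
--     return min_row, min_col, row_span, col_span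
-- ===== SOURCE B (Python) =====
-- def parse_grid_positions(grid_position_str, cols):
--     positions = [int(t) for t in grid_position_str.split(',')]
--
--     def bbox(lo, hi):
--         # bounding box (min_row, max_row, min_col, max_col) of positions[lo:hi], hi - lo >= 1
--         if hi - lo == 1:
--             p = positions[lo] - 1
--             r = p // cols + 1
--             c = p % cols + 1
--             return (r, r, c, c)
--         mid = (lo + hi) // 2
--         a = bbox(lo, mid)
--         b = bbox(mid, hi)
--         return (min(a[0], b[0]), max(a[1], b[1]), min(a[2], b[2]), max(a[3], b[3]))
--
--     min_row, max_row, min_col, max_col = bbox(0, len(positions))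
--     return min_row, min_col, max_row - min_row + 1, max_col - min_col + 1
-- ===== Notes on version B (the rewrite author's own statement) =====
-- stated objective: alternative
-- what changed: B computes the bounding box by divide-and-conquer: recursively split the parsed positions in half, compute each half's (min_row,max_row,min_col,max_col) box and merge the two boxes, instead of building row/col position lists and scanning them four times with min/max.
import Mathlib
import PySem

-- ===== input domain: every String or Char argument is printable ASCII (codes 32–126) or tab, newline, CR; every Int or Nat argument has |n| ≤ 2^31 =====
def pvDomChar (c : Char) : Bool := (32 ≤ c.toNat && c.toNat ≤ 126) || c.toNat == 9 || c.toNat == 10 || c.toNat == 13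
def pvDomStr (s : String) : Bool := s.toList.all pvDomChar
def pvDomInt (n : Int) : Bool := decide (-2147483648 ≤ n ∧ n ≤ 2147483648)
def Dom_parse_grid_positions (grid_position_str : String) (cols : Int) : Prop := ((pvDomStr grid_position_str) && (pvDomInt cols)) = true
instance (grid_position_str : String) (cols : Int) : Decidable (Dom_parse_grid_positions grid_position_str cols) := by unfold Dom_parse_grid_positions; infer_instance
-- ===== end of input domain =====

-- B computes the bounding box by divide-and-conquer (split the positions in half, merge the halves' boxes) instead of A's two mapped lists scanned four times with min/max.


-- ===== PORT A =====
def parse_grid_positions (grid_position_str : String) (cols : Int) : Int × Int × Int × Int :=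
  let tokens := (PySem.Str.split? grid_position_str ",").getD []
  let positions := tokens.map (fun t => (PySem.Int.ofStr? t).getD 0)
  let row_positions := positions.map (fun pos => PySem.Int.floordiv (pos - 1) cols + 1)
  let col_positions := positions.map (fun pos => PySem.Int.mod (pos - 1) cols + 1)
  let min_row := (PySem.List.min? row_positions (fun x => x)).getD 0
  let max_row := (PySem.List.max? row_positions (fun x => x)).getD 0
  let min_col := (PySem.List.min? col_positions (fun x => x)).getD 0
  let max_col := (PySem.List.max? col_positions (fun x => x)).getD 0
  let row_span := max_row - min_row + 1
  let col_span := max_col - min_col + 1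
  (min_row, min_col, row_span, col_span)

-- ===== PORT B =====
-- Source B's bbox(lo, hi): bounding box (min_row, max_row, min_col, max_col) of a slice of the
-- positions list, by splitting the slice in half and merging the two halves' boxes.
-- (Lean recursion is on the slice itself; [] is unreachable — bbox is only called on nonempty slices.)
def pvBBox (cols : Int) : List Int → Int × Int × Int × Int
  | [] => (0, 0, 0, 0)
  | [p] =>
    let r := PySem.Int.floordiv (p - 1) cols + 1
    let c := PySem.Int.mod (p - 1) cols + 1
    (r, r, c, c)
  | x :: y :: rest =>
    let l := x :: y :: rest
    let mid := l.length / 2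
    let a := pvBBox cols (l.take mid)
    let b := pvBBox cols (l.drop mid)
    (min a.1 b.1, max a.2.1 b.2.1, min a.2.2.1 b.2.2.1, max a.2.2.2 b.2.2.2)
termination_by l => l.length
decreasing_by
  · simp [List.length_take]; omega
  · simp; omega

def parse_grid_positions_alt (grid_position_str : String) (cols : Int) : Int × Int × Int × Int :=
  let positions := ((PySem.Str.split? grid_position_str ",").getD []).map (fun t => (PySem.Int.ofStr? t).getD 0)
  let b := pvBBox cols positions
  (b.1, b.2.2.1, b.2.1 - b.1 + 1, b.2.2.2 - b.2.2.1 + 1)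

-- ===== PRECONDITION & SPEC =====
-- Pre_ excludes exactly where the Python A raises: cols = 0 (ZeroDivisionError) and tokens int() rejects (ValueError).
def Pre_parse_grid_positions (grid_position_str : String) (cols : Int) : Prop :=
  cols ≠ 0 ∧ ∀ t ∈ (PySem.Str.split? grid_position_str ",").getD [], PySem.Int.ofStr? t ≠ none
instance (grid_position_str : String) (cols : Int) : Decidable (Pre_parse_grid_positions grid_position_str cols) := by unfold Pre_parse_grid_positions; infer_instance
def pvWitness_parse_grid_positions : String × Int := ("1,2,5", 2)
def Spec_parse_grid_positions (grid_position_str : String) (cols : Int) (out : Int × Int × Int × Int) : Prop := out = parse_grid_positions_alt grid_position_str cols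
instance (grid_position_str : String) (cols : Int) (out : Int × Int × Int × Int) : Decidable (Spec_parse_grid_positions grid_position_str cols out) := by unfold Spec_parse_grid_positions; infer_instance

-- ===== CLAIM (what is proved, stated in full; the proofs are below) =====
def Claim_equal_parse_grid_positions : Prop := ∀ (grid_position_str : String) (cols : Int), Dom_parse_grid_positions grid_position_str cols → Pre_parse_grid_positions grid_position_str cols → Spec_parse_grid_positions grid_position_str cols (parse_grid_positions grid_position_str cols)

-- ===== LEMMAS AND PROOFS =====

-- min/max of a nonempty list as A computes them (foldl from the head)
def pvNMin : List Int → Int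
  | [] => 0
  | x :: xs => xs.foldl min x
def pvNMax : List Int → Int
  | [] => 0
  | x :: xs => xs.foldl max x

theorem pvNMin_append (a b : List Int) (ha : a ≠ []) (hb : b ≠ []) :
    pvNMin (a ++ b) = min (pvNMin a) (pvNMin b) := by
  cases a with
  | nil => exact absurd rfl ha
  | cons x xs =>
    cases b with
    | nil => exact absurd rfl hb
    | cons y ys =>
      simp [pvNMin, List.foldl_append, List.foldl_assoc]

theorem pvNMax_append (a b : List Int) (ha : a ≠ []) (hb : b ≠ []) :
    pvNMax (a ++ b) = max (pvNMax a) (pvNMax b) := by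
  cases a with
  | nil => exact absurd rfl ha
  | cons x xs =>
    cases b with
    | nil => exact absurd rfl hb
    | cons y ys =>
      simp [pvNMax, List.foldl_append, List.foldl_assoc]

-- characterisation of B's divide-and-conquer box
theorem pvBBox_eq_aux (cols : Int) : ∀ (n : Nat) (l : List Int), l.length ≤ n →
    pvBBox cols l =
      (pvNMin (l.map (fun p => PySem.Int.floordiv (p - 1) cols + 1)),
       pvNMax (l.map (fun p => PySem.Int.floordiv (p - 1) cols + 1)),
       pvNMin (l.map (fun p => PySem.Int.mod (p - 1) cols + 1)),
       pvNMax (l.map (fun p => PySem.Int.mod (p - 1) cols + 1))) := by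
  intro n
  induction n with
  | zero =>
    intro l hl
    have : l = [] := List.eq_nil_of_length_eq_zero (Nat.le_zero.mp hl)
    subst this
    simp [pvBBox, pvNMin, pvNMax]
  | succ n ih =>
    intro l hl
    match l with
    | [] => simp [pvBBox, pvNMin, pvNMax]
    | [p] => simp [pvBBox, pvNMin, pvNMax]
    | x :: y :: rest =>
      have hlen : (x :: y :: rest).length = rest.length + 2 := by simp
      have hl' : rest.length + 2 ≤ n + 1 := by simpa using hl
      have hm1 : 1 ≤ (x :: y :: rest).length / 2 := by omega
      have hmlt : (x :: y :: rest).length / 2 < (x :: y :: rest).length := by omega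
      have iha := ih ((x :: y :: rest).take ((x :: y :: rest).length / 2))
        (by simp [List.length_take]; omega)
      have ihb := ih ((x :: y :: rest).drop ((x :: y :: rest).length / 2))
        (by simp; omega)
      have htne : (x :: y :: rest).take ((x :: y :: rest).length / 2) ≠ [] := by
        simp [List.take_eq_nil_iff]
      have hdne : (x :: y :: rest).drop ((x :: y :: rest).length / 2) ≠ [] := by
        simp [List.drop_eq_nil_iff]; omega
      have hsplit : ∀ f : Int → Int, (x :: y :: rest).map f =
          ((x :: y :: rest).take ((x :: y :: rest).length / 2)).map f ++
          ((x :: y :: rest).drop ((x :: y :: rest).length / 2)).map f := by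
        intro f; rw [← List.map_append, List.take_append_drop]
      simp only [pvBBox]
      rw [iha, ihb,
          hsplit (fun p => PySem.Int.floordiv (p - 1) cols + 1),
          hsplit (fun p => PySem.Int.mod (p - 1) cols + 1),
          pvNMin_append _ _ (by simp) (by simp; omega),
          pvNMax_append _ _ (by simp) (by simp; omega),
          pvNMin_append _ _ (by simp) (by simp; omega),
          pvNMax_append _ _ (by simp) (by simp; omega)]

theorem pvBBox_eq (cols : Int) (l : List Int) :
    pvBBox cols l =
      (pvNMin (l.map (fun p => PySem.Int.floordiv (p - 1) cols + 1)),
       pvNMax (l.map (fun p => PySem.Int.floordiv (p - 1) cols + 1)),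
       pvNMin (l.map (fun p => PySem.Int.mod (p - 1) cols + 1)),
       pvNMax (l.map (fun p => PySem.Int.mod (p - 1) cols + 1))) :=
  pvBBox_eq_aux cols l.length l le_rfl

-- splitOn.go never returns the empty list (every exit conses onto acc before reversing)
theorem pv_go_ne_nil (sep : List Char) : ∀ (fuel : Nat) (l cur : List Char) (acc : List (List Char)),
    PySem.Chars.splitOn.go sep fuel l cur acc ≠ [] := by
  intro fuel
  induction fuel with
  | zero => intro l cur acc; unfold PySem.Chars.splitOn.go; simp
  | succ n ih =>
    intro l cur acc
    unfold PySem.Chars.splitOn.go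
    cases l with
    | nil => simp
    | cons c rest =>
      by_cases h : sep.isPrefixOf (c :: rest) = true
      · simpa [h] using ih _ _ _
      · simpa [h] using ih _ _ _

theorem pv_split_ne_nil (s : String) : (PySem.Str.split? s ",").getD [] ≠ [] := by
  have h := PySem.Str.split?_map s ","
  cases hs : PySem.Str.split? s "," with
  | none =>
    rw [hs] at h
    simp [PySem.Chars.split?] at h
  | some xs =>
    rw [hs] at h
    simp [PySem.Chars.split?] at h
    intro hnil
    subst hnil
    simp [PySem.Chars.splitOn] at h
    exact pv_go_ne_nil _ _ _ _ _ h

-- ===== VERDICT (by name: the statement is the Claim_ definition above) =====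
theorem parse_grid_positions_spec : Claim_equal_parse_grid_positions := by
  intro s cols _ _
  unfold Spec_parse_grid_positions parse_grid_positions parse_grid_positions_alt
  cases hts : (PySem.Str.split? s ",").getD [] with
  | nil => exact absurd hts (pv_split_ne_nil s)
  | cons t ts =>
    simp only [pvBBox_eq, List.map_map, List.map_cons,
      PySem.List.min?_id_cons, PySem.List.max?_id_cons, Option.getD_some, pvNMin, pvNMax]
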